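/- GENERATED by tools/from_farm_form.py from prooffarm-gif/accepted/DGifDecompressLine.2/Lemmas.lean (a worked proof of the farm's unit `DGifDecompressLine.2`,
   accepted by the verdict) — do not edit. -/
import Gif.Spec.Units.DGifDecompressLine_2
import Gif.Spec.AllSegs

/-!
  Lemmas for the unit `DGifDecompressLine.2` (segment 2 of the LZW decoder: THE FIRST POP LOOP, dgif_lib.c:883-885).

      dl2_sp_zero, dl2_sp_pos   the test `StackPtr != 0` (the `je` at 106BF0H), both arms, as numbers
      dl2_i_ge, dl2_i_lt        the test `i < LineLen` (the `je` at 106BF8H), both arms, as numbers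
      dl2_dec                   `sub ebx, 1` of a StackPtr in `[1, 4095]`
      dl2_round                 ONE ROUND from the head 106BE3H: the head of the main loop (106F7DH), or the head of the pop
                                loop again with a smaller StackPtr
-/

open X86 X86.User Asan ProgX.Base ProgX.Base.Spec Gif.Spec

namespace Gif.Spec.DGifDecompressLine_2

/-- `test ebx, ebx ; setne al ; test al, al ; je` TAKEN (`hbr_106bf0`): the local StackPtr (a number ≤ 4095 in the whole register) is 0. -/
theorem dl2_sp_zero (bx : Word) (hbx : bx.toNat ≤ 4095)
    (h : (if ¬ (Word.part .w32 bx).toNat = 0 then (1 : BitVec 8) else 0).toNat = 0) : bx.toNat = 0 := by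
  have hp : (Word.part .w32 bx).toNat = bx.toNat % 2 ^ 32 := ProgX.toNat_part32 bx
  by_cases h0 : (Word.part .w32 bx).toNat = 0
  · omega
  · rw [if_pos h0] at h
    exact absurd h (by decide)

/-- The same `je` NOT taken: StackPtr is at least 1. -/
theorem dl2_sp_pos (bx : Word) (hbx : bx.toNat ≤ 4095)
    (h : ¬ (if ¬ (Word.part .w32 bx).toNat = 0 then (1 : BitVec 8) else 0).toNat = 0) : 1 ≤ bx.toNat := by
  have hp : (Word.part .w32 bx).toNat = bx.toNat % 2 ^ 32 := ProgX.toNat_part32 bx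
  by_cases h0 : (Word.part .w32 bx).toNat = 0
  · rw [if_neg (not_not_intro h0)] at h
    exact absurd rfl h
  · omega

/-- `cmp ebp, r14d ; setl dl ; test dl, dl ; je` TAKEN (`hbr_106bf8`): `i ≥ LineLen` (both non-negative `int`s). -/
theorem dl2_i_ge (bp r14 : Word) (hbp : bp.toNat < 2 ^ 31) (h14 : r14.toNat < 2 ^ 31)
    (h : (if (Word.part .w32 bp).toInt < (Word.part .w32 r14).toInt then (1 : BitVec 8) else 0).toNat = 0) :
    r14.toNat ≤ bp.toNat := by
  rw [part32_toInt_small bp hbp, part32_toInt_small r14 h14] at h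
  by_cases hlt : (bp.toNat : Int) < (r14.toNat : Int)
  · rw [if_pos hlt] at h
    exact absurd h (by decide)
  · omega

/-- The same `je` NOT taken: `i < LineLen`. -/
theorem dl2_i_lt (bp r14 : Word) (hbp : bp.toNat < 2 ^ 31) (h14 : r14.toNat < 2 ^ 31)
    (h : ¬ (if (Word.part .w32 bp).toInt < (Word.part .w32 r14).toInt then (1 : BitVec 8) else 0).toNat = 0) :
    bp.toNat < r14.toNat := by
  rw [part32_toInt_small bp hbp, part32_toInt_small r14 h14] at h
  by_cases hlt : (bp.toNat : Int) < (r14.toNat : Int)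
  · omega
  · rw [if_neg hlt] at h
    exact absurd rfl h

/-- `sub ebx, 1` of a StackPtr in `[1, 4095]`: the 32-bit value is the number `StackPtr − 1`. -/
theorem dl2_dec (bx : Word) (h1 : 1 ≤ bx.toNat) (hbx : bx.toNat ≤ 4095) :
    Word.part .w32 bx - 1#32 = BitVec.ofNat 32 (bx.toNat - 1) := by
  apply BitVec.eq_of_toNat_eq
  have hp : (Word.part .w32 bx).toNat = bx.toNat % 2 ^ 32 := ProgX.toNat_part32 bx
  have eb : Width.w32.bits = 32 := rfl
  rw [BitVec.toNat_sub, hp, BitVec.toNat_ofNat, BitVec.toNat_ofNat, eb]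
  omega

set_option maxRecDepth 4000 in
set_option maxHeartbeats 4000000 in
/-- **ONE ROUND OF THE FIRST POP LOOP** (dgif_lib.c:883-885; 106BE3H … 106C3FH, 107071H … 107080H). From `Pop` at the head
106BE3H: the test `StackPtr != 0 && i < LineLen` (two `setcc`, two `je`). `StackPtr == 0` (the `je` at 106BF0H to 107071H) or
`i >= LineLen` (the `je` at 106BF8H to 106C30H): nothing is stored, `r14 = Private` and `r13 = Prefix` come back from their spill
slots, `jmp 106F7DH`: `Head` of the main loop with the present measure (W1 by the failed test). Otherwise the checked load of
`Stack[StackPtr − 1]` (inside `Stack[4095]`: `stackLive`), the checked store `Line[i] =` (inside `Line[0 … n)`: `Body.line`), and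
the head again (`Body.carry`: the stores are the return-address slot of the two checks and one byte of `Line`), with a SMALLER
StackPtr: the measure of the loop. -/
theorem dl2_round {Lay : Layout} (hLay : Lay.hi = 0x1000000) {μ : Microarch} (hμ : UserX.MicroOK μ) {u₀ : State}
    (hcode : HasCodeNat Lay u₀ Gif.L.DGifDecompressLine.entry Gif.Code.code_DGifDecompressLine.nat Gif.L.DGifDecompressLine.size)
    (h_load1 : Asan.SmallCheck Lay μ ProgX.Base.WayInv (ProgX.Base.CodeOK u₀) [.rax, .rdx] 1 ProgX.Base.L.__asan_load1_noabort.entry)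
    (h_store1 : Asan.SmallCheck Lay μ ProgX.Base.WayInv (ProgX.Base.CodeOK u₀) [.rax, .rdx] 1 ProgX.Base.L.__asan_store1_noabort.entry)
    (H : Heap) (rest : List Obj) (frames : List (Nat × FrameLayout)) (F : Forest) (R : Rd) (n m : Nat) (e : State) (ret : Word)
    (v : State)
    (hat : DGifDecompressLine.Pop Gif.L.DGifDecompressLine.at_106be3 m H rest frames F R n u₀ e ret v) :
    ReachVia Lay μ WayInv v (fun w =>
      (∃ m', DGifDecompressLine.Head m' H rest frames F R n u₀ e ret w) ∨
      (DGifDecompressLine.Pop Gif.L.DGifDecompressLine.at_106be3 m H rest frames F R n u₀ e ret w ∧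
        (w.reg .rbx).toNat < (v.reg .rbx).toNat)) := by
  obtain ⟨hbody, hloc, h_rbx, h_rbp, h_r14, h_r15, h_spv, h_sprefix, h_mu⟩ := hat
  have he := hbody.entry
  v_entry he
  have hgin := hbody.gif_inside
  have hpin := hbody.pv_inside
  have hn31 := hbody.len_lt
  have w_rip := hbody.rip
  have c_rsp : v.reg .rsp = e.reg .rsp - 200 := hbody.rsp
  have w_eq : Mem.EqOn ProgX.Base.L.textLo ProgX.Base.L.textHi u₀.mem v.mem := ProgX.Base.conv_code_eqOn hbody.code
  have hdf : v.flags .df = false := (show abiInv _ from hbody.abi).1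
  have hmx : v.mxcsr &&& 0x1F80 = 0x1F80 := (show abiInv _ from hbody.abi).2
  have hsse := ProgX.Base.sseOK_of_abiInv hbody.abi
  have w_kept : RegsKept [.rsp] v v := RegsKept.refl _ _
  have c_r15 : v.reg .r15 = e.reg .rsi := h_r15
  have hbp31 : (v.reg .rbp).toNat < 2 ^ 31 := by omega
  have h14_31 : (v.reg .r14).toNat < 2 ^ 31 := by omega
  have k_stack : v.mem.readLE (e.reg .rsp - 192) 8 = F.pv + 344 := hloc.s_stack
  have k_pv : v.mem.readLE (e.reg .rsp - 144) 8 = F.pv := h_spv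
  have k_prefix : v.mem.readLE (e.reg .rsp - 136) 8 = F.pv + 8536 := h_sprefix
  u_walk hcode [hμ.vendor, Gif.Spec.sext32_small (v.reg .rbp) hbp31]
    until [Gif.L.DGifDecompressLine.chk6, Gif.L.DGifDecompressLine.at_106f7d]
    span [ProgX.Base.L.textLo, ProgX.Base.L.textHi] side (v_side)
  · -- EXIT 0x106f7d from 0x10707b (l.883 `StackPtr == 0`)
    have hsp0 := dl2_sp_zero _ h_rbx hbr_106bf0
    have habi : (conv u₀).inv s_10707b := by v_inv
    refine ReachVia.done (Or.inl ⟨mu R v.mem F.pv, ⟨hbody.moved w_rip w_rsp w_mem habi, hloc.moved w_mem, ?_, ?_, ?_, ?_, ?_⟩, ?_⟩)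
    · rw [w_r14]
      u_omega
    · rw [w_r13]
      u_omega
    · rw [w_kept .rbx rfl]
      exact h_rbx
    · rw [w_kept .rbp rfl]
      exact h_rbp
    · intro _
      rw [w_kept .rbx rfl]
      exact hsp0
    · rw [w_mem]
  · -- EXIT 0x106f7d from 0x106c3a (l.883 `i >= LineLen`)
    have hge := dl2_i_ge _ _ hbp31 h14_31 hbr_106bf8
    have habi : (conv u₀).inv s_106c3a := by v_inv
    refine ReachVia.done (Or.inl ⟨mu R v.mem F.pv, ⟨hbody.moved w_rip w_rsp w_mem habi, hloc.moved w_mem, ?_, ?_, ?_, ?_, ?_⟩, ?_⟩)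
    · rw [w_r14]
      u_omega
    · rw [w_r13]
      u_omega
    · rw [w_kept .rbx rfl]
      exact h_rbx
    · rw [w_kept .rbp rfl]
      exact h_rbp
    · intro hlt
      rw [w_kept .rbp rfl] at hlt
      omega
    · rw [w_mem]
  · -- 0x106c15: the loop test was true
    have hsp1 := dl2_sp_pos _ h_rbx hbr_106bf0
    have hilt := dl2_i_lt _ _ hbp31 h14_31 hbr_106bf8
    have hdec := dl2_dec _ hsp1 h_rbx
    rw [hdec, Gif.Spec.cnt32_sext_bv _ (by omega)] at w_rdi w_r12
    rw [hdec, Gif.Spec.cnt32_ofBV _ (by omega)] at w_rbx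
    clear hbr_106bf0 hbr_106bf8 hdec
    obtain ⟨hbuf, habove, hbelow, hapart⟩ := hbody.line (by omega)
    u_walk hcode [hμ.vendor] until [Gif.L.DGifDecompressLine.at_106be3]
      span [ProgX.Base.L.textLo, ProgX.Base.L.textHi] side (v_side)
    case check_106c15 =>
      -- l.884 `Stack[--StackPtr]`: inside `Stack[4095]` (index `StackPtr − 1 ≤ 4094`)
      have hun : ShadowUntouched v.mem s_106c15.mem := by v_untouched
      have hl := stackLive hbody.ok.pv_live rest (DGifDecompressLine.framesIn frames e) ((v.reg .rbx).toNat - 1) (by omega)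
      simp only [gfield] at hl
      exact hl.accSmall hbody.inv.shadow hun _ 1 (by decide) (by u_omega) (by u_omega)
    case check_106c22 =>
      -- l.884 `Line[i++] =`: inside `Line[0 … n)` (`i < LineLen`)
      have hun : ShadowUntouched v.mem s_106c22.mem := by v_untouched
      exact hbuf.live.accSmall hbody.inv.shadow hun _ 1 (by decide) (by u_omega) (by u_omega)
    -- EXIT 0x106be3 (l.883): the head again, `StackPtr − 1`, `i + 1`
    have hun : ShadowUntouched v.mem s_106c2e.mem := by v_untouched
    have hsame : Mem.SameExcept [⟨(e.reg .rsp).toNat - 208, (e.reg .rsp).toNat - 200⟩,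
        ⟨(e.reg .rsi).toNat + (v.reg .rbp).toNat, (e.reg .rsi).toNat + (v.reg .rbp).toNat + 1⟩]
        v.mem s_106c2e.mem := by
      rw [w_mem]
      u_same
    have habi : (conv u₀).inv s_106c2e := by v_inv
    obtain ⟨k_body, k_loc, k_mu, k_clear, k_eof⟩ :=
      hbody.carry (cut' := Gif.L.DGifDecompressLine.at_106be3) w_rip w_rsp w_eq habi hun hsame (by dl_scratch)
    refine ReachVia.done (Or.inr ⟨⟨k_body, k_loc hloc, ?_, ?_, ?_, ?_, ?_, ?_, ?_⟩, ?_⟩)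
    · rw [w_rbx]
      u_omega
    · rw [w_rbp, Gif.Spec.lea32_succ _ (by omega)]
      omega
    · rw [w_kept .r14 rfl]
      exact h_r14
    · rw [w_kept .r15 rfl]
      exact h_r15
    · u_frame h_spv
    · u_frame h_sprefix
    · rw [k_mu]
      exact h_mu
    · rw [w_rbx]
      u_omega

end Gif.Spec.DGifDecompressLine_2
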